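-- pv_equiv track=rewrite | github.com/ttppggnnss/CodingNote | 2004/0405/test05.py | solution
-- ===== SOURCE A (Python) =====
-- def solution(dataSource, tags):
--     n=len(dataSource)
--     for i in range(n):
--         cnt=0
--         for j in tags:
--             if j in dataSource[i]:
--                 cnt+=1
--         dataSource[i].append(cnt)
--     dataSource=sorted(dataSource, key=lambda x:x[-1],reverse=True)
--     answer=[i[0] for i in dataSource if i[-1]!=0]
--     return answer[:10]
-- ===== SOURCE B (Python) =====
-- def solution(dataSource, tags):
--     # bucket gather instead of comparison sort; keeps A's in-place append of the count
--     buckets = [[] for _ in range(len(tags) + 1)]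
--     for row in dataSource:
--         cnt = sum(1 for j in tags if j in row)
--         row.append(cnt)
--         if cnt:
--             buckets[cnt].append(row[0])
--     answer = []
--     for bucket in reversed(buckets[1:]):
--         answer.extend(bucket)
--     return answer[:10]
-- ===== Notes on version B (the rewrite author's own statement) =====
-- stated objective: alternative
-- what changed: Replaces the stable comparison sort over count-augmented rows by a counting/bucket gather: rows' first elements are dropped into buckets indexed by their tag count and the answer is collected by walking buckets from the highest count down to 1, so no sort happens at all.
import Mathlib
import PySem

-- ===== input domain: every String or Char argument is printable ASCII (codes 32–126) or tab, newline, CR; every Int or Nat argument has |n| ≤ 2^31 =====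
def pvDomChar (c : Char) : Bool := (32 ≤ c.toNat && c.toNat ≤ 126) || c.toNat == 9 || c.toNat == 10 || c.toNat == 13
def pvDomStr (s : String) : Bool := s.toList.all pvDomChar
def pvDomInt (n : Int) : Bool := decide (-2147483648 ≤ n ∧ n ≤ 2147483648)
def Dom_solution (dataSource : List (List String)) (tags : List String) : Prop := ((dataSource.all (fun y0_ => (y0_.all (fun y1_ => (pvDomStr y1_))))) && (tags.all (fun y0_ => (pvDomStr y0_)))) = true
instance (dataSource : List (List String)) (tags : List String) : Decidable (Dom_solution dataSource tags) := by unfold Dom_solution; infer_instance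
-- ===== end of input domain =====

-- B replaces A's stable comparison sort over count-augmented rows by a bucket gather indexed by
-- the tag count (objective: alternative algorithm). The equivalence is about the RETURN value only:
-- both Pythons also append each row's count onto the row in place.

-- ===== PORT A =====
-- A counts matching tags per row and appends the count in place (modelled by pairing the row with
-- its count), stable-sorts by count descending, keeps first elements of rows with nonzero count.
def solution (dataSource : List (List String)) (tags : List String) : List String :=
  let rows := dataSource.map (fun row =>
    (row, tags.foldl (fun cnt j => if row.contains j then cnt + 1 else cnt) (0 : Int)))
  let rows' := PySem.List.sorted rows (fun x => x.2) true
  -- i[0]: rows kept by the filter have a nonzero count, hence are nonempty, so headD never defaults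
  let answer := (rows'.filter (fun x => x.2 != 0)).map (fun x => x.1.headD "")
  answer.take 10      -- answer[:10] with a nonnegative bound is exactly take 10

-- ===== PORT B =====
def solution_alt (dataSource : List (List String)) (tags : List String) : List String :=
  let buckets := dataSource.foldl (fun bs row =>
      let cnt := tags.countP (fun j => row.contains j)
      -- buckets[cnt]: cnt ≤ len(tags) < len(buckets), so the index is always in range
      if cnt ≠ 0 then bs.set cnt (bs.getD cnt [] ++ [row.headD ""]) else bs)
    (List.replicate (tags.length + 1) [])
  -- buckets[1:] is drop 1; row[0] of a bucketed row is headD (cnt ≠ 0 makes the row nonempty)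
  (((buckets.drop 1).reverse).foldl (fun acc b => acc ++ b) []).take 10

-- ===== PRECONDITION & SPEC =====
def Spec_solution (dataSource : List (List String)) (tags : List String) (out : List String) : Prop := out = solution_alt dataSource tags
instance (dataSource : List (List String)) (tags : List String) (out : List String) : Decidable (Spec_solution dataSource tags out) := by unfold Spec_solution; infer_instance

-- ===== CLAIM (what is proved, stated in full; the proofs are below) =====
def Claim_equal_solution : Prop := ∀ (dataSource : List (List String)) (tags : List String), Dom_solution dataSource tags → Spec_solution dataSource tags (solution dataSource tags)

-- ===== LEMMAS AND PROOFS =====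

def keyOf (tags row : List String) : Nat := tags.countP (fun j => row.contains j)

def bucketF (tags : List String) (c : Nat) (ds : List (List String)) : List String :=
  (ds.filter (fun row => keyOf tags row == c)).map (fun row => row.headD "")

def desc (m : Nat) : List Int := ((List.range (m+1)).reverse).map Int.ofNat

def Gr {α : Type} (key : α → Int) (m : Nat) (rs : List α) : List α :=
  (desc m).flatMap (fun c => rs.filter (fun r => key r == c))

lemma insertBy_all_before {α : Type} (before : α → α → Bool) (x : α) (l : List α)
    (h : ∀ y ∈ l, before x y = true) : PySem.List.insertBy before x l = x :: l := by
  cases l with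
  | nil => rfl
  | cons y ys => simp [PySem.List.insertBy, h y (List.mem_cons_self)]

lemma insertBy_append_not {α : Type} (before : α → α → Bool) (x : α) (l1 l2 : List α)
    (h : ∀ y ∈ l1, before x y = false) :
    PySem.List.insertBy before x (l1 ++ l2) = l1 ++ PySem.List.insertBy before x l2 := by
  induction l1 with
  | nil => rfl
  | cons y ys ih =>
    simp only [List.cons_append, PySem.List.insertBy, h y (List.mem_cons_self)]
    simp only [Bool.false_eq_true, if_false]
    rw [ih (fun z hz => h z (List.mem_cons_of_mem _ hz))]

lemma desc_succ (m : Nat) : desc (m+1) = ((m+1 : Nat) : Int) :: desc m := by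
  simp [desc, List.range_succ]

lemma mem_desc {m : Nat} {c : Int} (h : c ∈ desc m) : 0 ≤ c ∧ c ≤ m := by
  simp [desc] at h
  obtain ⟨a, ha, rfl⟩ := h
  omega

lemma Gr_succ {α : Type} (key : α → Int) (m : Nat) (rs : List α) :
    Gr key (m+1) rs = rs.filter (fun r => key r == ((m+1 : Nat) : Int)) ++ Gr key m rs := by
  rw [Gr, desc_succ, List.flatMap_cons]; rfl

lemma mem_Gr {α : Type} {key : α → Int} {m : Nat} {rs : List α} {y : α}
    (h : y ∈ Gr key m rs) : (0 ≤ key y ∧ key y ≤ m) ∧ y ∈ rs := by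
  unfold Gr at h
  rw [List.mem_flatMap] at h
  obtain ⟨c, hc, hy⟩ := h
  have hc' := mem_desc hc
  have hk : key y = c := by simpa using List.of_mem_filter hy
  exact ⟨by omega, List.mem_of_mem_filter hy⟩


lemma Gr_append_high {α : Type} (key : α → Int) (m : Nat) (rs : List α) (x : α)
    (hx : (m : Int) < key x) : Gr key m (rs ++ [x]) = Gr key m rs := by
  unfold Gr
  refine List.flatMap_congr (fun c hcm => ?_)
  have hc' := mem_desc hcm
  rw [List.filter_append]
  have hne : ¬ (key x = c) := by omega
  simp [hne]

lemma insertBy_Gr {α : Type} (key : α → Int) (x : α) (hx0 : 0 ≤ key x) :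
    ∀ (m : Nat), key x ≤ m → ∀ rs : List α,
    PySem.List.insertBy (fun a b => decide (key b < key a)) x (Gr key m rs) = Gr key m (rs ++ [x]) := by
  intro m
  induction m with
  | zero =>
    intro hxm rs
    have hk : key x = 0 := le_antisymm hxm hx0
    have hall : ∀ y ∈ Gr key 0 rs, (fun a b => decide (key b < key a)) x y = false := by
      intro y hy
      have h1 := (mem_Gr hy).1
      simp only [decide_eq_false_iff_not, not_lt]
      push_cast at h1
      omega
    rw [PySem.List.insertBy_of_forall_not_before _ _ _ hall]
    show Gr key 0 rs ++ [x] = Gr key 0 (rs ++ [x])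
    simp [Gr, desc, List.filter_append, hk]
  | succ m ih =>
    intro hxm rs
    rw [Gr_succ, Gr_succ]
    by_cases hcase : key x = ((m+1 : Nat) : Int)
    · have htop : ∀ y ∈ rs.filter (fun r => key r == ((m+1 : Nat) : Int)), (fun a b => decide (key b < key a)) x y = false := by
        intro y hy
        have : key y = ((m+1 : Nat) : Int) := by simpa using List.of_mem_filter hy
        simp only [decide_eq_false_iff_not, not_lt]
        omega
      rw [insertBy_append_not _ _ _ _ htop]
      have hbot : ∀ y ∈ Gr key m rs, (fun a b => decide (key b < key a)) x y = true := by
        intro y hy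
        have h1 := (mem_Gr hy).1
        simp only [decide_eq_true_eq]
        push_cast at hcase h1 ⊢
        omega
      rw [insertBy_all_before _ _ _ hbot]
      rw [Gr_append_high key m rs x (by push_cast at hcase ⊢; omega)]
      rw [List.filter_append]
      simp [hcase]
    · push_cast at hcase
      have hxm' : key x ≤ (m : Int) := by push_cast at hxm ⊢; omega
      have htop : ∀ y ∈ rs.filter (fun r => key r == ((m+1 : Nat) : Int)), (fun a b => decide (key b < key a)) x y = false := by
        intro y hy
        have : key y = ((m+1 : Nat) : Int) := by simpa using List.of_mem_filter hy
        simp only [decide_eq_false_iff_not, not_lt]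
        push_cast at this hxm' ⊢
        omega
      rw [insertBy_append_not _ _ _ _ htop, ih hxm' rs]
      rw [List.filter_append]
      have : (([x] : List α).filter (fun r => key r == ((m+1 : Nat) : Int))) = [] := by
        simp [hcase]
      rw [this, List.append_nil]

lemma sorted_eq_Gr {α : Type} (key : α → Int) (m : Nat) (rs : List α)
    (h : ∀ r ∈ rs, 0 ≤ key r ∧ key r ≤ m) :
    PySem.List.sorted rs key true = Gr key m rs := by
  rw [PySem.List.sorted_rev_eq_foldl_insertBy]
  induction rs using List.reverseRecOn with
  | nil => simp [Gr]
  | append_singleton rs x ih =>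
    rw [List.foldl_concat]
    have hrs : ∀ r ∈ rs, 0 ≤ key r ∧ key r ≤ m := fun r hr => h r (List.mem_append_left _ hr)
    have hx := h x (List.mem_append_right _ (List.mem_singleton_self x))
    rw [ih hrs, insertBy_Gr key x hx.1 m hx.2 rs]

-- ===== B-side bucket lemmas =====

lemma getD_set_self {α : Type} (l : List α) (k : Nat) (v d : α) (h : k < l.length) :
    (l.set k v).getD k d = v := by
  simp [List.getD, h]

lemma getD_set_ne {α : Type} (l : List α) (k c : Nat) (v d : α) (h : k ≠ c) :
    (l.set k v).getD c d = l.getD c d := by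
  simp [List.getD, h]

lemma fold_len (tags : List String) (ds : List (List String)) (bs : List (List String)) :
    (ds.foldl (fun bs row =>
      let cnt := tags.countP (fun j => row.contains j)
      if cnt ≠ 0 then bs.set cnt (bs.getD cnt [] ++ [row.headD ""]) else bs) bs).length = bs.length := by
  induction ds generalizing bs with
  | nil => rfl
  | cons row ds ih =>
    simp only [List.foldl_cons]
    rw [ih]
    split <;> simp

lemma fold_getD (tags : List String) (ds : List (List String)) :
    ∀ bs : List (List String), bs.length = tags.length + 1 → ∀ c : Nat, c < tags.length + 1 →
    ((ds.foldl (fun bs row =>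
      let cnt := tags.countP (fun j => row.contains j)
      if cnt ≠ 0 then bs.set cnt (bs.getD cnt [] ++ [row.headD ""]) else bs) bs).getD c []
      = bs.getD c [] ++ (if c = 0 then [] else bucketF tags c ds)) := by
  induction ds with
  | nil =>
    intro bs hlen c hc
    simp only [List.foldl_nil, bucketF, List.filter_nil, List.map_nil]
    split <;> simp
  | cons row ds ih =>
    intro bs hlen c hc
    simp only [List.foldl_cons]
    by_cases hk0 : tags.countP (fun j => row.contains j) = 0
    · simp only [hk0, ne_eq, not_true_eq_false, if_false]
      rw [ih bs hlen c hc]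
      congr 1
      by_cases hc0 : c = 0
      · simp [hc0]
      · have : keyOf tags row ≠ c := by simp only [keyOf, hk0]; omega
        simp [hc0, bucketF, this]
    · have hklt : tags.countP (fun j => row.contains j) < bs.length := by
        rw [hlen]
        have := List.countP_le_length (p := fun j => row.contains j) (l := tags)
        omega
      simp only [ne_eq, hk0, not_false_eq_true, if_true]
      rw [ih _ (by rw [List.length_set]; exact hlen) c hc]
      by_cases hck : c = tags.countP (fun j => row.contains j)
      · rw [hck]
        rw [getD_set_self _ _ _ _ hklt]
        rw [if_neg hk0, if_neg hk0]
        rw [show bucketF tags (tags.countP (fun j => row.contains j)) (row :: ds)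
              = row.headD "" :: bucketF tags (tags.countP (fun j => row.contains j)) ds from by
          simp [bucketF, keyOf]]
        simp
      · rw [getD_set_ne _ _ _ _ _ (fun h => hck h.symm)]
        congr 1
        by_cases hc0 : c = 0
        · simp [hc0]
        · have : keyOf tags row ≠ c := by
            intro h
            exact hck (by simpa [keyOf] using h.symm)
          simp [hc0, bucketF, this]

lemma foldl_append_id {α : Type} (l : List (List α)) :
    l.foldl (fun acc b => acc ++ b) [] = l.flatten := by
  have h := PySem.List.foldl_append_eq_flatMap (fun b : List α => b) l []
  rw [List.flatten_eq_flatMap]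
  exact h

lemma gather_eq {β : Type} (bk : List (List β)) (g : Nat → List β) (m : Nat)
    (hlen : bk.length = m+1) (hg : ∀ c, c < m+1 → bk.getD c [] = g c) (hg0 : g 0 = []) :
    ((bk.drop 1).reverse).flatten = ((List.range (m+1)).reverse).flatMap g := by
  have hbk : bk = (List.range (m+1)).map g := by
    apply List.ext_getElem
    · simp [hlen]
    · intro i h1 h2
      rw [List.getElem_map, List.getElem_range]
      rw [← List.getD_eq_getElem bk [] h1]
      exact hg i (by rw [← hlen]; exact h1)
  rw [hbk]
  rw [List.range_succ_eq_map]
  simp only [List.map_cons, List.drop_succ_cons, List.drop_zero, List.reverse_cons,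
    List.flatMap_append, List.flatMap_cons, List.flatMap_nil, hg0, List.append_nil,
    ← List.map_reverse, List.flatMap_map]
  rw [List.map_map, List.flatten_eq_flatMap, List.flatMap_map]
  rfl

lemma A_char (ds : List (List String)) (tags : List String) :
    solution ds tags =
      ((((List.range (tags.length+1)).reverse).flatMap
        (fun a => if a = 0 then [] else bucketF tags a ds))).take 10 := by
  simp only [solution]
  have hrows : ds.map (fun row => (row, tags.foldl (fun cnt j => if row.contains j then cnt + 1 else cnt) (0 : Int)))
      = ds.map (fun row => (row, ((keyOf tags row : Nat) : Int))) := by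
    refine List.map_congr_left (fun row _ => ?_)
    rw [PySem.List.foldl_count_if]
    simp only [Int.zero_add, keyOf]
  rw [hrows]
  rw [sorted_eq_Gr (fun x : List String × Int => x.2) tags.length
      (ds.map (fun row => (row, ((keyOf tags row : Nat) : Int)))) (by
    intro r hr
    obtain ⟨row, _, rfl⟩ := List.mem_map.mp hr
    dsimp only
    constructor
    · exact_mod_cast Nat.zero_le _
    · simp only [keyOf]
      exact_mod_cast List.countP_le_length (p := fun j => row.contains j) (l := tags))]
  unfold Gr desc
  rw [List.filter_flatMap, List.map_flatMap, List.flatMap_map]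
  congr 1
  refine List.flatMap_congr (fun a _ => ?_)
  rw [List.filter_filter, List.filter_map, List.map_map]
  by_cases ha : a = 0
  · subst ha
    rw [List.filter_congr (q := fun _ => false) (by
      intro row _
      simp only [Function.comp]
      by_cases h : keyOf tags row = 0 <;> simp [h])]
    simp
  · rw [if_neg ha]
    rw [List.filter_congr (q := fun row => keyOf tags row == a) (by
      intro row _
      simp only [Function.comp]
      by_cases h : keyOf tags row = a
      · simp [h, ha]
      · have hb : ((keyOf tags row : Int) == (a : Int)) = false := by
          simp [h]
        simp [hb, h])]
    rfl

lemma B_char (ds : List (List String)) (tags : List String) :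
    solution_alt ds tags =
      ((((List.range (tags.length+1)).reverse).flatMap
        (fun a => if a = 0 then [] else bucketF tags a ds))).take 10 := by
  simp only [solution_alt]
  rw [foldl_append_id]
  rw [gather_eq _ (fun a => if a = 0 then [] else bucketF tags a ds) tags.length
    (by rw [fold_len]; simp)
    (by
      intro c hc
      rw [fold_getD tags ds _ (by simp) c hc]
      simp [List.getD, hc])
    rfl]


-- ===== VERDICT (by name: the statement is the Claim_ definition above) =====
theorem solution_spec : Claim_equal_solution := by
  intro dataSource tags _
  show solution dataSource tags = solution_alt dataSource tags
  rw [A_char, B_char]
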